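-- pv_equiv track=rewrite | github.com/AgentOxygen/GenTS | gents/ts_gen.py | getYearSlices
-- ===== SOURCE A (Python) =====
-- def getYearSlices(years: list, slice_length: int) -> list:
--     r"""Generates list of index tuples for slicing time array into year chunks.
--
--     Given a list of years, this function will divide the list into chunks, with
--     maximum length specified by `slice_length`. The chunking is configured
--     to align boundary years to multiples of the slice length. In other words,
--     the timeseries may begin and end with a slice chunk shorter than
--     `slice length`. For example, if a timeseries begins in 2015 and ends in
--     2092 is chunked by 10 years, the first chunk will be 2015-2019 and the last
--     chunk will be 2090-2092. Everything between will be 10 years (2020-2029,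
--     2030-2039, etc).
--
--     Parameters
--     ----------
--     years : list
--         Path to history file to pull metadata from.
--     slice_length : int
--         Number of years per chunk to slice.
--
--     Returns
--     -------
--     meta : dict
--         Dictionary containing useful metadata for specified history file.
--     """
--     slices = []
--     last_slice_yr = years[0]
--     for index in range(len(years)):
--         if years[index] % slice_length == 0 and years[index] != last_slice_yr:
--             if len(slices) == 0:
--                 slices.append((0, index))
--             else:
--                 slices.append((slices[-1][1], index))
--             last_slice_yr = years[index]
--     if len(slices) == 0:
--         slices.append((0, index + 1))
--     elif slices[-1][1] != index + 1:
--         slices.append((slices[-1][1], index + 1))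
--     return slices
-- ===== SOURCE B (Python) =====
-- def getYearSlices(years: list, slice_length: int) -> list:
--     # Stateless re-formulation: a cut happens at index i iff years[i] is a
--     # multiple of slice_length and differs from the year at the PREVIOUS such
--     # multiple (seeded with years[0]).  This is equivalent to A's "differs from
--     # the last cut year" state because whenever a multiple is not a cut, its
--     # year equals the last cut year, so the last cut year always equals the
--     # year of the previous multiple.  Built entirely from comprehensions.
--     n = len(years)
--     mults = [i for i in range(n) if years[i] % slice_length == 0]
--     prevs = [years[0]] + [years[i] for i in mults[:-1]]
--     cuts = [i for i, p in zip(mults, prevs) if years[i] != p]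
--     edges = [0] + cuts + [n]
--     return list(zip(edges, edges[1:]))
-- ===== Notes on version B (the rewrite author's own statement) =====
-- stated objective: simpler
-- what changed: B replaces A's stateful loop (appending tuples while re-reading slices[-1][1] and patching a final tuple afterwards) with a stateless comprehension pipeline: filter the indices of multiples, mark as cuts those whose year differs from the year at the previous multiple (seeded with years[0]) via a zip with the shifted list, and zip the edge list [0]+cuts+[n] with its own tail; correct because whenever a multiple is not a cut its year equals the last cut year, so 'last cut year' always equals the year at the previous multiple.
import Mathlib
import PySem

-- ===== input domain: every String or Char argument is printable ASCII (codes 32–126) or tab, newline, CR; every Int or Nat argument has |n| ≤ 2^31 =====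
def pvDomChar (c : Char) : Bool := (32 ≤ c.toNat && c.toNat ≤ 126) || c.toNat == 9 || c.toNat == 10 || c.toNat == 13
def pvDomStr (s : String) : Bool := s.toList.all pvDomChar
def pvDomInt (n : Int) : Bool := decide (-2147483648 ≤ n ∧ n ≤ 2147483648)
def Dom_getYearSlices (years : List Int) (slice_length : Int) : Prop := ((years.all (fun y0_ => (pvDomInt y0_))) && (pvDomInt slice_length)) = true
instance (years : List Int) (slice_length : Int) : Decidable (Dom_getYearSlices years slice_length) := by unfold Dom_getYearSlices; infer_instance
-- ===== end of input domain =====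

-- B replaces A's stateful single pass (append a tuple per boundary, re-reading
-- slices[-1][1], plus a post-loop fixup) by a stateless comprehension pipeline:
-- filter the multiple indices, compare each against the year at the PREVIOUS
-- multiple (seeded with years[0]), and zip the edge list with its shift; objective: simpler.

-- ===== PORT A =====
-- A's loop body: for each index, maybe append a tuple whose start is the previous
-- tuple's end (slices[-1][1], via pyGetD at -1) and update last_slice_yr.
def loopA (years : List Int) (slice_length : Int)
    (st : List (Int × Int) × Int) (index : Int) : List (Int × Int) × Int :=
  let y := PySem.List.pyGetD years index 0
  if PySem.Int.mod y slice_length = 0 ∧ y ≠ st.2 then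
    (if st.1.length = 0 then st.1 ++ [((0 : Int), index)]
     else st.1 ++ [((PySem.List.pyGetD st.1 (-1) ((0 : Int), (0 : Int))).2, index)], y)
  else st

def getYearSlices (years : List Int) (slice_length : Int) : List (Int × Int) :=
  -- last_slice_yr = years[0]; Pre_ excludes years = [] (IndexError), so the default is unreachable
  let st := (PySem.List.pyRange 0 (years.length : Int) 1).foldl
    (loopA years slice_length) ([], PySem.List.pyGetD years 0 0)
  -- after the loop, index = len(years) - 1 (Pre_ excludes the empty list, where Python raises)
  let index : Int := (years.length : Int) - 1
  if st.1.length = 0 then st.1 ++ [((0 : Int), index + 1)]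
  else if (PySem.List.pyGetD st.1 (-1) ((0 : Int), (0 : Int))).2 ≠ index + 1 then
    st.1 ++ [((PySem.List.pyGetD st.1 (-1) ((0 : Int), (0 : Int))).2, index + 1)]
  else st.1

-- ===== PORT B =====
-- Stateless transliteration of Source B: list comprehensions become filter/map/zip,
-- mults[:-1] and edges[1:] stay PySem slices.
def getYearSlices_alt (years : List Int) (slice_length : Int) : List (Int × Int) :=
  let n : Int := (years.length : Int)
  let mults := (PySem.List.pyRange 0 n 1).filter
    (fun i => PySem.Int.mod (PySem.List.pyGetD years i 0) slice_length == 0)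
  let prevs := [PySem.List.pyGetD years 0 0] ++
    (PySem.List.slice mults none (some (-1))).map (fun i => PySem.List.pyGetD years i 0)
  let cuts := ((mults.zip prevs).filter
    (fun ip => PySem.List.pyGetD years ip.1 0 != ip.2)).map Prod.fst
  let edges := [(0 : Int)] ++ cuts ++ [n]
  edges.zip (PySem.List.slice edges (some 1) none)

-- ===== PRECONDITION & SPEC =====
-- Pre_ excludes exactly the inputs where the Python A raises: the empty list
-- (IndexError on years[0]) and slice_length = 0 (ZeroDivisionError on '%').
def Pre_getYearSlices (years : List Int) (slice_length : Int) : Prop :=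
  years ≠ [] ∧ slice_length ≠ 0
instance (years : List Int) (slice_length : Int) : Decidable (Pre_getYearSlices years slice_length) := by unfold Pre_getYearSlices; infer_instance

def pvWitness_getYearSlices : List Int × Int := ([2015, 2016, 2020, 2021, 2030], 10)

def Spec_getYearSlices (years : List Int) (slice_length : Int) (out : List (Int × Int)) : Prop := out = getYearSlices_alt years slice_length
instance (years : List Int) (slice_length : Int) (out : List (Int × Int)) : Decidable (Spec_getYearSlices years slice_length out) := by unfold Spec_getYearSlices; infer_instance

-- ===== CLAIM (what is proved, stated in full; the proofs are below) =====
def Claim_equal_getYearSlices : Prop := ∀ (years : List Int) (slice_length : Int), Dom_getYearSlices years slice_length → Pre_getYearSlices years slice_length → Spec_getYearSlices years slice_length (getYearSlices years slice_length)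

-- ===== LEMMAS AND PROOFS =====

-- adjacent pairs of a cut list: what both final forms reduce to
def adj (l : List Int) : List (Int × Int) := l.zip l.tail

-- proof-side stateful cut collector (the common intermediate between A's fold
-- and B's comprehensions)
def loopB (years : List Int) (slice_length : Int)
    (st : List Int × Int) (i : Int) : List Int × Int :=
  let y := PySem.List.pyGetD years i 0
  if PySem.Int.mod y slice_length = 0 ∧ y ≠ st.2 then (st.1 ++ [i], y) else st

lemma adj_concat (l : List Int) (x : Int) (h : l ≠ []) :
    adj (l ++ [x]) = adj l ++ [(l.getLastD 0, x)] := by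
  induction l with
  | nil => exact absurd rfl h
  | cons a t ih =>
    cases t with
    | nil => simp [adj]
    | cons b t' =>
      have := ih (by simp)
      simp only [adj] at this ⊢
      simp_all [List.getLastD]

lemma adj_ne_nil (a b : Int) (t : List Int) : adj (a :: b :: t) ≠ [] := by
  simp [adj]

lemma snd_pyGetD_neg_one_adj (l : List Int) (h : 2 ≤ l.length) :
    (PySem.List.pyGetD (adj l) (-1) ((0 : Int), (0 : Int))).2 = l.getLastD 0 := by
  induction l using List.reverseRecOn with
  | nil => simp at h
  | append_singleton init x _ =>
    have hinit : init ≠ [] := by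
      intro hn; subst hn; simp at h
    rw [adj_concat init x hinit]
    simp

lemma sim (years : List Int) (slice_length : Int) :
    ∀ (idxs : List Int) (cuts : List Int) (last : Int), cuts ≠ [] → cuts.head? = some 0 →
    (idxs.foldl (loopA years slice_length) (adj cuts, last)
      = (adj (idxs.foldl (loopB years slice_length) (cuts, last)).1,
         (idxs.foldl (loopB years slice_length) (cuts, last)).2))
    ∧ (idxs.foldl (loopB years slice_length) (cuts, last)).1 ≠ []
    ∧ (∀ x ∈ (idxs.foldl (loopB years slice_length) (cuts, last)).1, x ∈ cuts ∨ x ∈ idxs)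
    ∧ (idxs.foldl (loopB years slice_length) (cuts, last)).1.head? = cuts.head? := by
  intro idxs
  induction idxs with
  | nil =>
    intro cuts last h _
    exact ⟨rfl, h, fun x hx => Or.inl hx, rfl⟩
  | cons i rest ih =>
    intro cuts last h hhead
    by_cases hc : PySem.Int.mod (PySem.List.pyGetD years i 0) slice_length = 0 ∧
        PySem.List.pyGetD years i 0 ≠ last
    · -- the guard fires: both sides append
      have hstepB : loopB years slice_length (cuts, last) i
          = (cuts ++ [i], PySem.List.pyGetD years i 0) := by
        simp [loopB, hc]
      have hstepA : loopA years slice_length (adj cuts, last) i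
          = (adj (cuts ++ [i]), PySem.List.pyGetD years i 0) := by
        obtain ⟨c0, t⟩ := List.exists_cons_of_ne_nil h
        obtain ⟨t, rfl⟩ := t
        have hc0 : c0 = 0 := by simpa using hhead
        cases t with
        | nil => simp [loopA, hc, adj, hc0]
        | cons b t' =>
          have h2 : 2 ≤ (c0 :: b :: t').length := by simp
          simp only [loopA]
          rw [if_pos hc]
          rw [adj_concat _ _ (by simp)]
          have hlen : (adj (c0 :: b :: t')).length ≠ 0 := by
            simpa using adj_ne_nil c0 b t'
          rw [snd_pyGetD_neg_one_adj _ h2]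
          simp [hlen]
      rw [List.foldl_cons, List.foldl_cons, hstepA, hstepB]
      have hh' : (cuts ++ [i]).head? = cuts.head? := by
        cases cuts with | nil => exact absurd rfl h | cons a t => rfl
      have := ih (cuts ++ [i]) (PySem.List.pyGetD years i 0) (by simp)
        (by rw [hh']; exact hhead)
      refine ⟨this.1, this.2.1, fun x hx => ?_, this.2.2.2.trans hh'⟩
      rcases this.2.2.1 x hx with hx' | hx'
      · rcases List.mem_append.mp hx' with h1 | h1
        · exact Or.inl h1
        · exact Or.inr (by simp at h1; simp [h1])
      · exact Or.inr (List.mem_cons_of_mem _ hx')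
    · -- guard false: both states unchanged
      have hstepB : loopB years slice_length (cuts, last) i = (cuts, last) := by
        simp [loopB, hc]
      have hstepA : loopA years slice_length (adj cuts, last) i = (adj cuts, last) := by
        simp [loopA, hc]
      rw [List.foldl_cons, List.foldl_cons, hstepA, hstepB]
      have := ih cuts last h hhead
      refine ⟨this.1, this.2.1, fun x hx => ?_, this.2.2.2⟩
      rcases this.2.2.1 x hx with hx' | hx'
      · exact Or.inl hx'
      · exact Or.inr (List.mem_cons_of_mem _ hx')

-- the stateful collector equals B's stateless zip-with-predecessors filter
lemma loopB_eq (years : List Int) (slice_length : Int) :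
    ∀ (idxs : List Int) (acc : List Int) (s : Int),
    (idxs.foldl (loopB years slice_length) (acc, s)).1
    = acc ++ ((((idxs.filter (fun i => PySem.Int.mod (PySem.List.pyGetD years i 0) slice_length == 0)).zip
        (s :: ((idxs.filter (fun i => PySem.Int.mod (PySem.List.pyGetD years i 0) slice_length == 0)).dropLast).map
          (fun i => PySem.List.pyGetD years i 0))).filter
        (fun ip => PySem.List.pyGetD years ip.1 0 != ip.2)).map Prod.fst) := by
  intro idxs
  induction idxs with
  | nil => intro acc s; simp
  | cons i t ih =>
    intro acc s
    by_cases hP : PySem.Int.mod (PySem.List.pyGetD years i 0) slice_length = 0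
    · have hfilter : (i :: t).filter (fun i => PySem.Int.mod (PySem.List.pyGetD years i 0) slice_length == 0)
          = i :: t.filter (fun i => PySem.Int.mod (PySem.List.pyGetD years i 0) slice_length == 0) := by
        simp [hP]
      rw [hfilter]
      by_cases hne : PySem.List.pyGetD years i 0 = s
      · -- multiple, but equal to the seed: not a cut on either side
        have hstep : loopB years slice_length (acc, s) i = (acc, s) := by
          simp [loopB, hne]
        rw [List.foldl_cons, hstep, ih]
        cases hft : t.filter (fun i => PySem.Int.mod (PySem.List.pyGetD years i 0) slice_length == 0) with
        | nil => simp [hne]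
        | cons b ft' =>
          simp only [List.dropLast_cons₂, List.map_cons, List.zip_cons_cons, List.filter_cons]
          rw [hne]
          simp [← hft]
      · -- a genuine cut: kept on both sides, and the new seed is y i on both
        have hstep : loopB years slice_length (acc, s) i
            = (acc ++ [i], PySem.List.pyGetD years i 0) := by
          simp [loopB, hP, hne]
        rw [List.foldl_cons, hstep, ih]
        cases hft : t.filter (fun i => PySem.Int.mod (PySem.List.pyGetD years i 0) slice_length == 0) with
        | nil => simp [hne]
        | cons b ft' =>
          simp only [List.dropLast_cons₂, List.map_cons, List.zip_cons_cons, List.filter_cons]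
          simp [← hft, hne]
    · -- not a multiple: skipped on both sides
      have hstep : loopB years slice_length (acc, s) i = (acc, s) := by
        simp [loopB, hP]
      have hfilter : (i :: t).filter (fun i => PySem.Int.mod (PySem.List.pyGetD years i 0) slice_length == 0)
          = t.filter (fun i => PySem.Int.mod (PySem.List.pyGetD years i 0) slice_length == 0) := by
        simp [hP]
      rw [List.foldl_cons, hstep, hfilter, ih]

-- A's post-loop fixup applied to adj(0::cb) yields adj of the edge list with n appended
lemma postA (cb : List Int) (n : Int) (hlt : ∀ x ∈ (0 : Int) :: cb, x < n) :
    (if (adj (0 :: cb)).length = 0 then adj (0 :: cb) ++ [((0 : Int), n - 1 + 1)]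
     else if (PySem.List.pyGetD (adj (0 :: cb)) (-1) ((0 : Int), (0 : Int))).2 ≠ n - 1 + 1 then
       adj (0 :: cb) ++ [((PySem.List.pyGetD (adj (0 :: cb)) (-1) ((0 : Int), (0 : Int))).2, n - 1 + 1)]
     else adj (0 :: cb)) = adj ((0 :: cb) ++ [n]) := by
  cases cb with
  | nil =>
    simp only [adj]
    norm_num
  | cons b t' =>
    have hlen : (adj (0 :: b :: t')).length ≠ 0 := by simpa using adj_ne_nil 0 b t'
    have h2 : 2 ≤ (0 :: b :: t').length := by simp
    have hlast : (0 :: b :: t').getLastD 0 ∈ ((0 : Int) :: b :: t') := by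
      have := List.getLast_mem (l := (0 : Int) :: b :: t') (by simp)
      rwa [List.getLast_eq_getLastD] at this
    have hln : (0 :: b :: t').getLastD 0 ≠ n := by
      have := hlt _ hlast
      omega
    rw [if_neg (by simpa using hlen)]
    rw [snd_pyGetD_neg_one_adj _ h2]
    rw [if_pos (by intro hcon; apply hln; omega)]
    rw [adj_concat _ _ (by simp)]
    norm_num

-- ===== VERDICT (by name: the statement is the Claim_ definition above) =====
theorem getYearSlices_spec : Claim_equal_getYearSlices := by
  intro years slice_length _ hpre
  obtain ⟨hne, hsl⟩ := hpre
  have hn : 1 ≤ (years.length : Int) := by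
    have := List.length_pos_of_ne_nil hne; omega
  obtain ⟨hA, hBne, hmem, hhead⟩ := sim years slice_length
    (PySem.List.pyRange 0 (years.length : Int) 1) [0] (PySem.List.pyGetD years 0 0)
    (by simp) (by simp)
  set mults := (PySem.List.pyRange 0 (years.length : Int) 1).filter
    (fun i => PySem.Int.mod (PySem.List.pyGetD years i 0) slice_length == 0) with hmults
  set cutsB := ((mults.zip (PySem.List.pyGetD years 0 0 :: mults.dropLast.map
      (fun i => PySem.List.pyGetD years i 0))).filter
      (fun ip => PySem.List.pyGetD years ip.1 0 != ip.2)).map Prod.fst with hcutsB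
  have hF : (List.foldl (loopB years slice_length) ([0], PySem.List.pyGetD years 0 0)
        (PySem.List.pyRange 0 (years.length : Int) 1)).1 = 0 :: cutsB := by
    rw [loopB_eq years slice_length _ [0] (PySem.List.pyGetD years 0 0)]
    simp [hcutsB, hmults]
  -- B's output is adj of the edge list
  have hB : getYearSlices_alt years slice_length = adj ((0 :: cutsB) ++ [(years.length : Int)]) := by
    unfold getYearSlices_alt
    simp only [PySem.List.slice_to_neg_one, PySem.List.slice_from_one]
    simp [adj, hcutsB, hmults]
  have hA2 : List.foldl (loopA years slice_length)
        (([] : List (Int × Int)), PySem.List.pyGetD years 0 0)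
        (PySem.List.pyRange 0 (years.length : Int) 1)
      = (adj (0 :: cutsB),
         (List.foldl (loopB years slice_length) ([0], PySem.List.pyGetD years 0 0)
          (PySem.List.pyRange 0 (years.length : Int) 1)).2) := by
    rw [← hF]; exact hA
  -- bound: every cut index is < length
  have hlt : ∀ x ∈ (0 : Int) :: cutsB, x < (years.length : Int) := by
    intro x hx
    rw [← hF] at hx
    rcases hmem x hx with h1 | h1
    · simp at h1; omega
    · have := (PySem.List.mem_pyRange_one).mp h1; omega
  unfold Spec_getYearSlices getYearSlices
  rw [hB]
  simp only [hA2]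
  exact postA cutsB (years.length : Int) hlt
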